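-- pv_equiv track=rewrite | github.com/kcnti/2110101-com-prog | homework/hw3/hw3.py | get_section_point_count
-- ===== SOURCE A (Python) =====
-- def get_section_point_count(stu_section_points, min_point):
--     out = []
--     [out.append([i[0], 0]) for i in stu_section_points if not [i[0], 0] in out]
--     for i in stu_section_points:
--         for j in out:
--             if i[0] == j[0] and i[1] >= min_point:
--                 out[out.index(j)][1] += 1
--                 break
--     return sorted(out)
-- ===== SOURCE B (Python) =====
-- def get_section_point_count(stu_section_points, min_point):
--     sections = sorted({r[0] for r in stu_section_points})
--     return [[s, sum(1 for r in stu_section_points if r[0] == s and r[1] >= min_point)]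
--             for s in sections]
-- ===== Notes on version B (the rewrite author's own statement) =====
-- stated objective: simpler
-- what changed: Instead of building a dedup list of [section,0] pairs and then, for every row, rescanning that list with list.index to mutate a counter in place, B computes the sorted set of sections once and produces each [section, count] directly with one count per section; no mutation, no inner index scans.
import Mathlib
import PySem

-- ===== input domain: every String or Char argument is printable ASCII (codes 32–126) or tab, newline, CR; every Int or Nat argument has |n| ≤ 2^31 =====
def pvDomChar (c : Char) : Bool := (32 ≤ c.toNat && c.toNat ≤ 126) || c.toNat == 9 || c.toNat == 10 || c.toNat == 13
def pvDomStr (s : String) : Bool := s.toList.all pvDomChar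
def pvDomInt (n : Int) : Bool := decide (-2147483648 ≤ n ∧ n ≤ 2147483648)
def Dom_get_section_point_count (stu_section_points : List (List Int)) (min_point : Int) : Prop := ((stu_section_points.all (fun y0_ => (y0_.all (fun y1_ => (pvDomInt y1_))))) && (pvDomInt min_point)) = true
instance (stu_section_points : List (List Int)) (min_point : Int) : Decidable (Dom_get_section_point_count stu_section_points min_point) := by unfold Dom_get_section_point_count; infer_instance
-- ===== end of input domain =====

-- B replaces A's dedup-list plus nested mutate-and-rescan loops by a sorted set of sections
-- and one count per section (objective: simpler / more idiomatic; same asymptotic cost).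

-- ===== PORT A =====
-- inner loop: 'for j in out: if i[0] == j[0] and i[1] >= min_point: out[out.index(j)][1] += 1; break'
def pvAScan (i : List Int) (min_point : Int) : List (List Int) → List (List Int) → List (List Int)
  | [], out => out
  | j :: js, out =>
    if PySem.List.pyGetD i 0 0 = PySem.List.pyGetD j 0 0 ∧ min_point ≤ PySem.List.pyGetD i 1 0 then
      -- out[out.index(j)][1] += 1   (j ∈ out, so index? is some; '.getD 0' and '.getD []' only totalize)
      out.set ((PySem.List.index? out j).getD 0)
        (PySem.List.pySetD (out.getD ((PySem.List.index? out j).getD 0) [])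
          1 (PySem.List.pyGetD (out.getD ((PySem.List.index? out j).getD 0) []) 1 0 + 1))
    else pvAScan i min_point js out

def get_section_point_count (stu_section_points : List (List Int)) (min_point : Int) : List (List Int) :=
  -- out = []; [out.append([i[0], 0]) for i in stu_section_points if not [i[0], 0] in out]
  -- for i in stu_section_points: for j in out: …
  -- return sorted(out)
  PySem.List.sorted
    (stu_section_points.foldl (fun out i => pvAScan i min_point out out)
      (stu_section_points.foldl
        (fun out i => if [PySem.List.pyGetD i 0 0, (0 : Int)] ∈ out then out
                      else out ++ [[PySem.List.pyGetD i 0 0, (0 : Int)]]) []))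
    (fun x => x) false

-- ===== PORT B =====
def get_section_point_count_alt (stu_section_points : List (List Int)) (min_point : Int) : List (List Int) :=
  -- sections = sorted({r[0] for r in stu_section_points})
  -- return [[s, sum(1 for r in stu_section_points if r[0] == s and r[1] >= min_point)] for s in sections]
  (PySem.List.sorted
    (PySem.Set.ofList (stu_section_points.map (fun r => PySem.List.pyGetD r 0 0)))
    (fun x => x) false).map (fun s =>
    [s, (stu_section_points.map (fun r =>
          if PySem.List.pyGetD r 0 0 == s && decide (min_point ≤ PySem.List.pyGetD r 1 0)
          then (1 : Int) else 0)).sum])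

-- ===== PRECONDITION & SPEC =====
-- Pre_ excludes exactly the inputs where Python A raises IndexError: a row shorter than 2
-- (A reads i[0] and i[1] of every row; B reads r[0] and r[1] too and raises there as well).
def Pre_get_section_point_count (stu_section_points : List (List Int)) (min_point : Int) : Prop :=
  ∀ r ∈ stu_section_points, 2 ≤ r.length
instance (stu_section_points : List (List Int)) (min_point : Int) : Decidable (Pre_get_section_point_count stu_section_points min_point) := by unfold Pre_get_section_point_count; infer_instance

def pvWitness_get_section_point_count : List (List Int) × Int := ([[1, 5], [2, 3], [1, 2]], 3)

def Spec_get_section_point_count (stu_section_points : List (List Int)) (min_point : Int) (out : List (List Int)) : Prop := out = get_section_point_count_alt stu_section_points min_point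
instance (stu_section_points : List (List Int)) (min_point : Int) (out : List (List Int)) : Decidable (Spec_get_section_point_count stu_section_points min_point out) := by unfold Spec_get_section_point_count; infer_instance

-- ===== CLAIM (what is proved, stated in full; the proofs are below) =====
def Claim_equal_get_section_point_count : Prop := ∀ (stu_section_points : List (List Int)) (min_point : Int), Dom_get_section_point_count stu_section_points min_point → Pre_get_section_point_count stu_section_points min_point → Spec_get_section_point_count stu_section_points min_point (get_section_point_count stu_section_points min_point)

-- ===== LEMMAS AND PROOFS =====

-- the per-section/threshold predicate both results count with
def pvPred (min_point s : Int) (r : List Int) : Bool :=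
  PySem.List.pyGetD r 0 0 == s && decide (min_point ≤ PySem.List.pyGetD r 1 0)

-- A's first comprehension builds the ordered dedup of the sections, tagged with 0
lemma pvFold1 (l : List (List Int)) (S : List Int) :
    l.foldl (fun out i => if [PySem.List.pyGetD i 0 0, (0 : Int)] ∈ out then out
                          else out ++ [[PySem.List.pyGetD i 0 0, (0 : Int)]])
      (S.map (fun s => [s, 0])) =
    (PySem.Set.update S (l.map (fun i => PySem.List.pyGetD i 0 0))).map (fun s => [s, 0]) := by
  induction l generalizing S with
  | nil => simp [PySem.Set.update]
  | cons i l ih =>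
    simp only [List.foldl_cons, List.map_cons, PySem.Set.update, List.foldl_cons]
    by_cases h : PySem.List.pyGetD i 0 0 ∈ S
    · have hmem : [PySem.List.pyGetD i 0 0, (0:Int)] ∈ S.map (fun s => [s, 0]) := by
        exact List.mem_map.mpr ⟨_, h, rfl⟩
      have hadd : PySem.Set.add S (PySem.List.pyGetD i 0 0) = S := by
        simp [PySem.Set.add, PySem.Set.contains, h]
      rw [if_pos hmem]
      have := ih S
      simp only [PySem.Set.update] at this
      rw [this, hadd]
    · have hmem : [PySem.List.pyGetD i 0 0, (0:Int)] ∉ S.map (fun s => [s, 0]) := by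
        simp only [List.mem_map]
        rintro ⟨s, hs, he⟩
        cases he; exact h hs
      have hadd : PySem.Set.add S (PySem.List.pyGetD i 0 0) = S ++ [PySem.List.pyGetD i 0 0] := by
        simp [PySem.Set.add, PySem.Set.contains, h]
      rw [if_neg hmem]
      have := ih (S ++ [PySem.List.pyGetD i 0 0])
      simp only [PySem.Set.update] at this
      rw [hadd, ← this, List.map_append]
      simp

-- a scan of A's inner loop that can never fire leaves out unchanged
lemma pvScan_miss (i : List Int) (mp : Int) (js out : List (List Int))
    (h : ¬ mp ≤ PySem.List.pyGetD i 1 0) : pvAScan i mp js out = out := by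
  induction js with
  | nil => rfl
  | cons j js ih =>
    rw [pvAScan, if_neg]
    · exact ih
    · rintro ⟨-, h2⟩; exact h h2

-- a scan that fires increments exactly the entry of i's section
lemma pvScan_hit (i : List Int) (mp : Int) (c : Int → Int) (S1 S2 : List Int)
    (hnd : (S1 ++ S2).Nodup) (hk : PySem.List.pyGetD i 0 0 ∉ S1)
    (hmem : PySem.List.pyGetD i 0 0 ∈ S2) (hmp : mp ≤ PySem.List.pyGetD i 1 0) :
    pvAScan i mp (S2.map (fun s => [s, c s])) ((S1 ++ S2).map (fun s => [s, c s])) =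
      (S1 ++ S2).map (fun s => [s, if s = PySem.List.pyGetD i 0 0 then c s + 1 else c s]) := by
  induction S2 generalizing S1 with
  | nil => exact absurd hmem (by simp)
  | cons s rest ih =>
    by_cases hs : PySem.List.pyGetD i 0 0 = s
    · subst hs
      set k := PySem.List.pyGetD i 0 0 with hkdef
      rw [List.map_cons, pvAScan, if_pos ⟨rfl, hmp⟩]
      have hsplit : (S1 ++ k :: rest).map (fun s => [s, c s]) =
          S1.map (fun s => [s, c s]) ++ [k, c k] :: rest.map (fun s => [s, c s]) := by simp
      have hidx : PySem.List.index? ((S1 ++ k :: rest).map (fun s => [s, c s])) [k, c k] = some (S1.map (fun s => [s, c s])).length := by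
        rw [PySem.List.index?_eq_some_iff]
        refine ⟨S1.map (fun s => [s, c s]), rest.map (fun s => [s, c s]), by simp, rfl, ?_⟩
        simp only [List.mem_map]
        rintro ⟨t, ht, he⟩
        cases he
        exact hk ht
      rw [hidx, Option.getD_some]
      have hget : ((S1 ++ k :: rest).map (fun s => [s, c s])).getD (S1.map (fun s => [s, c s])).length [] = [k, c k] := by
        rw [hsplit, List.getD_eq_getElem?_getD, List.getElem?_append_right (Nat.le_refl _)]
        simp
      rw [hget]
      have hval : PySem.List.pySetD [k, c k] 1 (PySem.List.pyGetD [k, c k] 1 0 + 1) = [k, c k + 1] := rfl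
      rw [hval, hsplit, List.set_append_right _ _ (Nat.le_refl _), Nat.sub_self]
      have hrest : k ∉ rest := by
        have := (List.nodup_append.mp hnd).2.1
        simp at this
        exact this.1
      rw [List.map_append, List.map_cons, if_pos rfl]
      have h1 : S1.map (fun s => [s, if s = k then c s + 1 else c s]) = S1.map (fun s => [s, c s]) := by
        apply List.map_congr_left
        intro t ht
        rw [if_neg (by rintro rfl; exact hk ht)]
      have h2 : rest.map (fun s => [s, if s = k then c s + 1 else c s]) = rest.map (fun s => [s, c s]) := by
        apply List.map_congr_left
        intro t ht
        rw [if_neg (by rintro rfl; exact hrest ht)]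
      rw [h1, h2]
      rfl
    · rw [List.map_cons, pvAScan, if_neg (by rintro ⟨h1, -⟩; exact hs h1)]
      have hmem' : PySem.List.pyGetD i 0 0 ∈ rest := by
        rcases List.mem_cons.mp hmem with h | h
        · exact absurd h hs
        · exact h
      have := ih (S1 ++ [s]) (by simpa using hnd) (by simp [hs]; exact fun h => hk h) hmem'
      simpa using this

-- A's outer loop adds, per section, the number of qualifying rows
lemma pvFold2 (l : List (List Int)) (mp : Int) (S : List Int) (c : Int → Int)
    (hnd : S.Nodup) (hsub : ∀ i ∈ l, PySem.List.pyGetD i 0 0 ∈ S) :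
    l.foldl (fun out i => pvAScan i mp out out) (S.map (fun s => [s, c s])) =
      S.map (fun s => [s, c s + (l.countP (pvPred mp s) : Int)]) := by
  induction l generalizing c with
  | nil =>
    simp only [List.foldl_nil, List.countP_nil]
    apply List.map_congr_left
    intro s _
    simp
  | cons i l ih =>
    rw [List.foldl_cons]
    by_cases hmp : mp ≤ PySem.List.pyGetD i 1 0
    · have hhit := pvScan_hit i mp c [] S (by simpa using hnd) (by simp) (hsub i (by simp)) hmp
      simp only [List.nil_append] at hhit
      rw [hhit]
      have hih := ih (fun t => if t = PySem.List.pyGetD i 0 0 then c t + 1 else c t) (fun j hj => hsub j (by simp [hj]))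
      rw [hih]
      apply List.map_congr_left
      intro s _
      simp only [List.cons.injEq, and_true, true_and]
      rw [List.countP_cons]
      by_cases hsi : s = PySem.List.pyGetD i 0 0
      · rw [if_pos hsi]
        have : pvPred mp s i = true := by
          simp [pvPred, hsi.symm, hmp]
        rw [this]
        simp
        ring
      · rw [if_neg hsi]
        have : pvPred mp s i = false := by
          simp [pvPred, hmp]
          intro h; exact absurd h.symm hsi
        rw [this]
        simp
    · rw [pvScan_miss i mp _ _ hmp, ih c (fun j hj => hsub j (by simp [hj]))]
      apply List.map_congr_left
      intro s _
      have : pvPred mp s i = false := by simp [pvPred, hmp]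
      rw [List.countP_cons, this]
      simp

-- sorted with the identity key is the same under core's List LT and Mathlib's lex order on List Int
lemma pvSortedSwap (xs : List (List Int)) :
    @PySem.List.sorted (List Int) (List Int) List.instLT (fun a b => a.decidableLT b) xs (fun x => x) false =
    @PySem.List.sorted (List Int) (List Int) List.instLinearOrder.toLT LinearOrder.toDecidableLT xs (fun x => x) false := by
  rw [@PySem.List.sorted_eq_foldl_insertBy (List Int) (List Int) List.instLT (fun a b => a.decidableLT b) xs (fun x => x),
      @PySem.List.sorted_eq_foldl_insertBy (List Int) (List Int) List.instLinearOrder.toLT LinearOrder.toDecidableLT xs (fun x => x)]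
  congr 1
  funext acc x
  congr 1
  funext a b
  exact decide_eq_decide.mpr (List.lt_iff_lex_lt a b)

-- sorting the tagged table = tagging the sorted sections
lemma pvSortedMap (S : List Int) (g : Int → Int) (hnd : S.Nodup) :
    PySem.List.sorted (S.map (fun s => [s, g s])) (fun x => x) false =
      (PySem.List.sorted S (fun x => x) false).map (fun s => [s, g s]) := by
  rw [pvSortedSwap]
  apply PySem.List.sorted_eq_of_perm_of_pairwise_lt
  · exact ((PySem.List.sorted_perm S (fun x => x) false).map _)
  · rw [List.pairwise_map]
    have hle : List.Pairwise (fun a b : Int => a ≤ b) (PySem.List.sorted S (fun x => x) false) := by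
      simpa using PySem.List.sorted_pairwise S (fun x => x)
    have hnd' : (PySem.List.sorted S (fun x => x) false).Nodup :=
      (PySem.List.sorted_perm S (fun x => x) false).nodup_iff.mpr hnd
    have hne : List.Pairwise (fun a b : Int => a ≠ b) (PySem.List.sorted S (fun x => x) false) := hnd'
    have hlt : List.Pairwise (fun a b : Int => a < b) (PySem.List.sorted S (fun x => x) false) :=
      (hle.and hne).imp (fun h => lt_of_le_of_ne h.1 h.2)
    refine hlt.imp ?_
    intro a b h
    exact List.Lex.rel h

-- ===== VERDICT (by name: the statement is the Claim_ definition above) =====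
theorem get_section_point_count_spec : Claim_equal_get_section_point_count := by
  intro pts mp _hdom _hpre
  unfold Spec_get_section_point_count get_section_point_count get_section_point_count_alt
  have h0 := pvFold1 pts []
  simp only [List.map_nil] at h0
  rw [h0]
  have hupd : PySem.Set.update ([] : List Int) (pts.map (fun i => PySem.List.pyGetD i 0 0)) =
      PySem.Set.ofList (pts.map (fun i => PySem.List.pyGetD i 0 0)) := by
    rw [PySem.Set.ofList_eq_foldl]; rfl
  rw [hupd]
  have h2 := pvFold2 pts mp (PySem.Set.ofList (pts.map (fun i => PySem.List.pyGetD i 0 0))) (fun _ => 0)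
    (PySem.Set.nodup_ofList _)
    (fun i hi => (PySem.Set.mem_ofList _ _).mpr (List.mem_map.mpr ⟨i, hi, rfl⟩))
  simp only at h2
  rw [h2]
  rw [pvSortedMap _ (fun s => 0 + (pts.countP (pvPred mp s) : Int)) (PySem.Set.nodup_ofList _)]
  apply List.map_congr_left
  intro s _
  rw [show (pts.map (fun r =>
          if PySem.List.pyGetD r 0 0 == s && decide (mp ≤ PySem.List.pyGetD r 1 0)
          then (1 : Int) else 0)).sum = ((pts.countP (pvPred mp s) : Int))
      from PySem.List.sum_map_ite_one_zero (pvPred mp s) pts]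
  simp
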